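-- pv_equiv track=rewrite | github.com/insung0-dklee/OSS_File-System_2024_1 | Control/FileEdit.py | make_plates
-- ===== SOURCE A (Python) =====
-- def make_plates(password, basekey):
--     allplate = len(password)
--     baselen = len(basekey)
--     plates = []
--     for plate in range(allplate):
--         baseplate = []
--         for i in range(plate + 1):
--             for id in range(len(basekey)):
--                 if i + id * (plate + 1) > baselen - 1:
--                     break
--                 baseplate.append(basekey[i + id * (plate + 1)])
--         plates.append(baseplate)
--     return plates
-- ===== SOURCE B (Python) =====
-- def make_plates(password, basekey):
--     plates = []
--     for p in range(len(password)):
--         s = p + 1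
--         pairs = [(idx % s, basekey[idx]) for idx in range(len(basekey))]
--         buckets = {}
--         for k, ch in pairs:
--             buckets.setdefault(k, []).append(ch)
--         baseplate = []
--         for i in range(s):
--             baseplate.extend(buckets.get(i, []))
--         plates.append(baseplate)
--     return plates
-- ===== Notes on version B (the rewrite author's own statement) =====
-- stated objective: alternative
-- what changed: Replaces A's three nested loops with break (one scan per residue class) by a single forward pass over basekey that groups characters into residue-class buckets in a dict, then flattens the buckets in key order.
import Mathlib
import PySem

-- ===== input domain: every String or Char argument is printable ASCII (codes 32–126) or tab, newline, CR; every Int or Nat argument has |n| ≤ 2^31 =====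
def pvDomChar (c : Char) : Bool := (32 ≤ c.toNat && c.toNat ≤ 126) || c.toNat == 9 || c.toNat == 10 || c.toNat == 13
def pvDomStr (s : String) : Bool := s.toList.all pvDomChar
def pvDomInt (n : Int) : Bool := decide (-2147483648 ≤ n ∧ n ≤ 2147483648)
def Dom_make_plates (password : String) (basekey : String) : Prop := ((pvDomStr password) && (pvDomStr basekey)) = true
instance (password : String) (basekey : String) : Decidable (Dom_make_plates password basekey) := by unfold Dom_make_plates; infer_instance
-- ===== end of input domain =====

-- B replaces A's nested residue-class scans (with break) by one pass grouping basekey's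
-- characters into residue buckets (a dict), then flattening the buckets in order; same cost class.



-- ===== PORT A =====
-- inner `for id in range(len(basekey)): if i+id*(plate+1) > baselen-1: break; baseplate.append(basekey[...])`
-- (break ported as early return of the accumulator; the Int guard mirrors Python's `baselen - 1`;
--  indexing via getD is exact because the guard guarantees i + id * s < baselen when we read)
def aIdLoop (chars : List Char) (baselen s i : Nat) : List Nat → List String → List String
  | [], bp => bp
  | id :: rest, bp =>
    if (i : Int) + (id : Int) * (s : Int) > (baselen : Int) - 1 then bp
    else aIdLoop chars baselen s i rest (bp ++ [(chars.getD (i + id * s) ' ').toString])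

def make_plates (password : String) (basekey : String) : List (List String) :=
  let allplate := password.toList.length
  let baselen := basekey.toList.length
  (List.range allplate).foldl (fun plates plate =>
    let baseplate := (List.range (plate + 1)).foldl
      (fun bp i => aIdLoop basekey.toList baselen (plate + 1) i (List.range baselen) bp) []
    plates ++ [baseplate]) []

-- ===== PORT B =====
def make_plates_alt (password : String) (basekey : String) : List (List String) :=
  let chars := basekey.toList
  (List.range password.toList.length).foldl (fun plates p =>
    let s := p + 1
    let pairs := (List.range chars.length).map (fun idx => (idx % s, (chars.getD idx ' ').toString))
    let buckets := pairs.foldl (fun d pr => d.modify pr.1 [] (· ++ [pr.2])) (PySem.Dict.empty)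
    let baseplate := (List.range s).foldl (fun bp i => bp ++ buckets.getD i []) []
    plates ++ [baseplate]) []

-- ===== PRECONDITION & SPEC =====
def Spec_make_plates (password : String) (basekey : String) (out : List (List String)) : Prop := out = make_plates_alt password basekey
instance (password : String) (basekey : String) (out : List (List String)) : Decidable (Spec_make_plates password basekey out) := by unfold Spec_make_plates; infer_instance

-- ===== CLAIM (what is proved, stated in full; the proofs are below) =====
def Claim_equal_make_plates : Prop := ∀ (password : String) (basekey : String), Dom_make_plates password basekey → Spec_make_plates password basekey (make_plates password basekey)

-- ===== LEMMAS AND PROOFS =====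

lemma foldl_ext {α β : Type} (f g : β → α → β) (l : List α)
    (h : ∀ acc x, x ∈ l → f acc x = g acc x) : ∀ b, l.foldl f b = l.foldl g b := by
  induction l with
  | nil => intro b; rfl
  | cons a t ih =>
    intro b
    simp only [List.foldl_cons]
    rw [h b a List.mem_cons_self]
    exact ih (fun acc x hx => h acc x (List.mem_cons_of_mem _ hx)) _

lemma aIdLoop_eq (chars : List Char) (s i : Nat) :
    ∀ (ids : List Nat) (bp : List String), ids.Pairwise (· ≤ ·) →
      aIdLoop chars chars.length s i ids bp =
        bp ++ ((ids.filter (fun id => decide (i + id * s < chars.length))).map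
                (fun id => (chars.getD (i + id * s) ' ').toString)) := by
  intro ids
  induction ids with
  | nil => intro bp _; simp [aIdLoop]
  | cons a rest ih =>
    intro bp hpw
    rw [List.pairwise_cons] at hpw
    obtain ⟨ha, hrest⟩ := hpw
    by_cases h : (i : Int) + (a : Int) * (s : Int) > (chars.length : Int) - 1
    · have hna : ¬ (i + a * s < chars.length) := by
        rw [show ((a : Int) * (s : Int)) = ((a * s : Nat) : Int) by push_cast; ring] at h
        omega
      have hfil : (a :: rest).filter (fun id => decide (i + id * s < chars.length)) = [] := by
        rw [List.filter_eq_nil_iff]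
        intro b hb
        simp only [decide_eq_true_eq]
        rcases List.mem_cons.mp hb with rfl | hb'
        · exact hna
        · have hab : a ≤ b := ha b hb'
          have : a * s ≤ b * s := Nat.mul_le_mul_right s hab
          omega
      rw [hfil]
      simp [aIdLoop, h]
    · have hlt : i + a * s < chars.length := by
        rw [show ((a : Int) * (s : Int)) = ((a * s : Nat) : Int) by push_cast; ring] at h
        omega
      simp only [aIdLoop, if_neg h]
      rw [ih _ hrest]
      simp [hlt]

lemma sorted_nat_ext (l1 l2 : List Nat) (h1 : l1.Pairwise (· < ·)) (h2 : l2.Pairwise (· < ·))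
    (hm : ∀ x, x ∈ l1 ↔ x ∈ l2) : l1 = l2 := by
  induction l1 generalizing l2 with
  | nil =>
    cases l2 with
    | nil => rfl
    | cons b u => exact absurd ((hm b).mpr (List.mem_cons_self)) (List.not_mem_nil)
  | cons a t ih =>
    cases l2 with
    | nil => exact absurd ((hm a).mp (List.mem_cons_self)) (List.not_mem_nil)
    | cons b u =>
      rw [List.pairwise_cons] at h1 h2
      obtain ⟨ha, ht⟩ := h1
      obtain ⟨hb, hu⟩ := h2
      have hab : a = b := by
        rcases List.mem_cons.mp ((hm a).mp List.mem_cons_self) with h | h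
        · exact h
        · rcases List.mem_cons.mp ((hm b).mpr List.mem_cons_self) with h' | h'
          · exact h'.symm
          · exact absurd (Nat.lt_trans (hb a h) (ha b h')) (Nat.lt_irrefl b)
      subst hab
      congr 1
      apply ih u ht hu
      intro x
      constructor
      · intro hx
        rcases List.mem_cons.mp ((hm x).mp (List.mem_cons_of_mem _ hx)) with rfl | h'
        · exact absurd (ha x hx) (Nat.lt_irrefl x)
        · exact h'
      · intro hx
        rcases List.mem_cons.mp ((hm x).mpr (List.mem_cons_of_mem _ hx)) with rfl | h'
        · exact absurd (hb x hx) (Nat.lt_irrefl x)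
        · exact h'

lemma class_index_eq (n s i : Nat) (hs : 0 < s) (hi : i < s) :
    ((List.range n).filter (fun id => decide (i + id * s < n))).map (fun id => i + id * s) =
      (List.range n).filter (fun x => x % s == i) := by
  apply sorted_nat_ext
  · rw [List.pairwise_map]
    apply List.Pairwise.imp ?_ (List.Pairwise.filter _ List.pairwise_lt_range)
    intro a b hab
    have := (Nat.mul_lt_mul_right hs).mpr hab
    omega
  · exact List.Pairwise.filter _ List.pairwise_lt_range
  · intro x
    simp only [List.mem_map, List.mem_filter, List.mem_range, decide_eq_true_eq, beq_iff_eq]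
    constructor
    · rintro ⟨id, ⟨⟨_, hlt⟩, rfl⟩⟩
      refine ⟨hlt, ?_⟩
      rw [Nat.add_mul_mod_self_right, Nat.mod_eq_of_lt hi]
    · rintro ⟨hx, hmod⟩
      refine ⟨x / s, ⟨⟨Nat.lt_of_le_of_lt (Nat.div_le_self x s) hx, ?_⟩, ?_⟩⟩ <;>
      · have hdm := Nat.mod_add_div x s
        rw [hmod] at hdm
        rw [Nat.mul_comm]
        omega

-- B's bucket i holds exactly the characters of residue class i, in index order
lemma bucket_eq (chars : List Char) (s i : Nat) :
    ((((List.range chars.length).map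
          (fun idx => (idx % s, (chars.getD idx ' ').toString))).foldl
        (fun d pr => d.modify pr.1 [] (· ++ [pr.2])) PySem.Dict.empty).getD i []) =
      ((List.range chars.length).filter (fun x => x % s == i)).map
        (fun idx => (chars.getD idx ' ').toString) := by
  rw [PySem.Dict.getD_foldl_modify_append]
  rw [PySem.Dict.getD_empty]
  rw [List.filter_map, List.map_map]
  rfl

lemma plate_eq (chars : List Char) (s : Nat) (hs : 0 < s) :
    (List.range s).foldl (fun bp i => aIdLoop chars chars.length s i (List.range chars.length) bp) [] =
      (List.range s).foldl (fun bp i =>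
        bp ++ (((List.range chars.length).map
                  (fun idx => (idx % s, (chars.getD idx ' ').toString))).foldl
                (fun d pr => d.modify pr.1 [] (· ++ [pr.2])) PySem.Dict.empty).getD i []) [] := by
  apply foldl_ext
  intro bp i hi
  rw [List.mem_range] at hi
  rw [aIdLoop_eq chars s i (List.range chars.length) bp
      (List.pairwise_lt_range.imp Nat.le_of_lt)]
  rw [bucket_eq chars s i]
  rw [← class_index_eq chars.length s i hs hi, List.map_map]
  rfl

-- ===== VERDICT (by name: the statement is the Claim_ definition above) =====
theorem make_plates_spec : Claim_equal_make_plates := by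
  intro password basekey _
  unfold Spec_make_plates make_plates make_plates_alt
  apply foldl_ext
  intro plates p _
  dsimp only
  rw [plate_eq basekey.toList (p + 1) (Nat.succ_pos p)]
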